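-- pv_equiv track=rewrite | github.com/hoyack/archon72 | src/infrastructure/stubs/override_abuse_validator_stub.py | _is_witness_suppression_scope
-- ===== SOURCE A (Python) =====
-- def _is_witness_suppression_scope(scope: str) -> bool:
--     """Check if scope attempts witness suppression (FR26).
--
--     Note: This is already covered by Story 5.4's ConstitutionValidatorProtocol,
--     but included here for completeness.
--
--     Args:
--         scope: The scope to check (lowercase).
--
--     Returns:
--         True if scope attempts witness suppression.
--     """
--     witness_patterns = {"witness", "witnessing", "attestation"}
--
--     if scope in witness_patterns:
--         return True
--
--     for pattern in witness_patterns: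
--         if scope.startswith(f"{pattern}."):
--             return True
--
--     return False
-- ===== SOURCE B (Python) =====
-- def _is_witness_suppression_scope(scope: str) -> bool:
--     """Check if scope attempts witness suppression (FR26)."""
--     return scope.split(".", 1)[0] in {"witness", "witnessing", "attestation"}
-- ===== Notes on version B (the rewrite author's own statement) =====
-- stated objective: simpler
-- what changed: Replaces the exact-membership check plus a loop of per-pattern startswith tests with a single extraction of the leading dot-separated segment (split with maxsplit 1) and one set membership test.
import Mathlib
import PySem

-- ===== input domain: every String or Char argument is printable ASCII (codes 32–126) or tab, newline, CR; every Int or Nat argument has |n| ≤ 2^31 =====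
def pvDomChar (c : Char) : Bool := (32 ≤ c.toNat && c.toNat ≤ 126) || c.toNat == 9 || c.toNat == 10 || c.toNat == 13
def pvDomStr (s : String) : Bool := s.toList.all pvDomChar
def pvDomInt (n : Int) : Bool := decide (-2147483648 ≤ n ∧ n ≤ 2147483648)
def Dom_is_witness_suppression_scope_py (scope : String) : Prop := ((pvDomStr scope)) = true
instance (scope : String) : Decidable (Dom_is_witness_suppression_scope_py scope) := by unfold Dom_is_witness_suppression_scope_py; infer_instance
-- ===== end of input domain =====

-- B replaces A's exact-membership test plus per-pattern startswith loop by one split of the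
-- leading dot-segment and a single membership test (simpler decomposition).

-- ===== PORT A =====
def is_witness_suppression_scope_py (scope : String) : Bool :=
  let witness_patterns : List String := ["witness", "witnessing", "attestation"]
  if witness_patterns.contains scope then
    true
  else
    -- f"{pattern}." is pattern with '.' appended; startswith checked on the char lists (exact)
    witness_patterns.any (fun pattern =>
      PySem.Chars.startswith scope.toList (pattern.toList ++ ['.']))

-- ===== PORT B =====
def is_witness_suppression_scope_py_alt (scope : String) : Bool :=
  -- scope.split(".", 1)[0]: the split always returns a nonempty list, so [0] is its head
  let head := ((PySem.Str.splitMax? scope "." 1).getD []).headD ""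
  (["witness", "witnessing", "attestation"] : List String).contains head

-- ===== PRECONDITION & SPEC =====
def Spec_is_witness_suppression_scope_py (scope : String) (out : Bool) : Prop := out = is_witness_suppression_scope_py_alt scope
instance (scope : String) (out : Bool) : Decidable (Spec_is_witness_suppression_scope_py scope out) := by unfold Spec_is_witness_suppression_scope_py; infer_instance

-- ===== CLAIM (what is proved, stated in full; the proofs are below) =====
def Claim_equal_is_witness_suppression_scope_py : Prop := ∀ (scope : String), Dom_is_witness_suppression_scope_py scope → Spec_is_witness_suppression_scope_py scope (is_witness_suppression_scope_py scope)

-- ===== LEMMAS AND PROOFS =====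

-- every result of splitOnMax.go starts with acc.reverse
lemma pv_go_acc (sep : List Char) (fuel m : Nat) (l cur : List Char) (acc : List (List Char)) :
    ∃ t, PySem.Chars.splitOnMax.go sep fuel m l cur acc = acc.reverse ++ t := by
  induction fuel generalizing m l cur acc with
  | zero => exact ⟨[(cur.reverse ++ l)], by rw [PySem.Chars.splitOnMax.go.eq_def]; simp⟩
  | succ f ih =>
    cases l with
    | nil => exact ⟨[cur.reverse], by rw [PySem.Chars.splitOnMax.go.eq_def]; simp⟩
    | cons c rest =>
      rw [PySem.Chars.splitOnMax.go.eq_def]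
      by_cases hm : m = 0
      · exact ⟨[(cur.reverse ++ (c :: rest))], by simp [hm]⟩
      · simp only [hm, if_false]
        by_cases hp : sep.isPrefixOf (c :: rest)
        · simp only [hp, if_true]
          obtain ⟨t, ht⟩ := ih (m - 1) (List.drop sep.length (c :: rest)) [] (cur.reverse :: acc)
          exact ⟨cur.reverse :: t, by simp [ht]⟩
        · simp only [hp, Bool.false_eq_true, if_false]
          exact ih m rest (c :: cur) acc

-- with empty acc, fuel ≥ |l| and at least one split allowed, the first piece go produces
-- is cur.reverse followed by the segment of l before the first '.'
lemma pv_go_head (l : List Char) (fuel m : Nat) (cur : List Char)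
    (hf : l.length ≤ fuel) (hm : m ≠ 0) :
    ∃ t, PySem.Chars.splitOnMax.go ['.'] fuel m l cur [] =
      (cur.reverse ++ l.takeWhile (· ≠ '.')) :: t := by
  induction l generalizing fuel cur with
  | nil =>
    cases fuel with
    | zero => exact ⟨[], by rw [PySem.Chars.splitOnMax.go.eq_def]; simp⟩
    | succ f => exact ⟨[], by rw [PySem.Chars.splitOnMax.go.eq_def]; simp⟩
  | cons c rest ih =>
    cases fuel with
    | zero => simp at hf
    | succ f =>
      rw [PySem.Chars.splitOnMax.go.eq_def]
      simp only [hm, if_false]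
      by_cases hc : c = '.'
      · have hp : (['.'] : List Char).isPrefixOf (c :: rest) = true := by
          simp [List.isPrefixOf, hc]
        simp only [hp, if_true]
        obtain ⟨t, ht⟩ := pv_go_acc ['.'] f (m - 1)
          (List.drop (['.'] : List Char).length (c :: rest)) [] [cur.reverse]
        refine ⟨t, ?_⟩
        rw [ht]
        simp [hc]
      · have hp : (['.'] : List Char).isPrefixOf (c :: rest) = false := by
          simp [List.isPrefixOf]; exact fun h => hc h.symm
        simp only [hp, Bool.false_eq_true, if_false]
        obtain ⟨t, ht⟩ := ih f (c :: cur) (by simpa using Nat.le_of_succ_le_succ hf)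
        refine ⟨t, ?_⟩
        rw [ht]
        simp [hc]

-- scope.split(".", 1)[0] is the segment of scope before the first '.'
lemma pv_split_head (s : String) :
    ((PySem.Str.splitMax? s "." 1).getD []).headD "" =
      String.ofList (s.toList.takeWhile (· ≠ '.')) := by
  obtain ⟨t, ht⟩ := pv_go_head s.toList (s.length + 1) 1 [] (by simp) (by omega)
  simp only [PySem.Str.splitMax?, PySem.Chars.splitMax?, PySem.Chars.splitOnMax,
    show (".":String).toList = ['.'] from rfl]
  norm_num
  rw [ht]
  simp

-- for a dot-free pattern p, "l equals p or starts with p followed by '.'" says exactly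
-- that the segment of l before the first dot is p
lemma pv_pattern_iff (l p : List Char) (hp : '.' ∉ p) :
    (l = p ∨ (p ++ ['.']) <+: l) ↔ l.takeWhile (· ≠ '.') = p := by
  have hall : List.takeWhile (fun c => decide (c ≠ '.')) p = p :=
    List.takeWhile_eq_self_iff.mpr (fun a ha => by simp; rintro rfl; exact hp ha)
  constructor
  · rintro (rfl | ⟨r, rfl⟩)
    · exact hall
    · rw [List.append_assoc, List.takeWhile_append, hall, if_pos rfl]
      simp
  · intro h
    have hsplit := List.takeWhile_append_dropWhile (p := fun c => decide (c ≠ '.')) (l := l)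
    cases hd : l.dropWhile (fun c => decide (c ≠ '.')) with
    | nil => left; rw [← hsplit, h, hd]; simp
    | cons d r =>
      have hne : l.dropWhile (fun c => decide (c ≠ '.')) ≠ [] := by
        simp only [hd]; exact List.cons_ne_nil d r
      have hhead := List.head_dropWhile_not (fun c => decide (c ≠ '.')) hne
      have hdd : d = '.' := by
        have hh : (l.dropWhile (fun c => decide (c ≠ '.'))).head hne = d := by
          simp only [hd]; rfl
        rw [hh] at hhead; simpa using hhead
      refine Or.inr ⟨r, ?_⟩
      rw [← hsplit, h, hd, hdd]
      simp

-- ===== VERDICT (by name: the statement is the Claim_ definition above) =====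
theorem is_witness_suppression_scope_py_spec : Claim_equal_is_witness_suppression_scope_py := by
  intro scope _
  unfold Spec_is_witness_suppression_scope_py
  have hw := pv_pattern_iff scope.toList "witness".toList (by decide)
  have hwi := pv_pattern_iff scope.toList "witnessing".toList (by decide)
  have ha := pv_pattern_iff scope.toList "attestation".toList (by decide)
  rw [Bool.eq_iff_iff]
  unfold is_witness_suppression_scope_py is_witness_suppression_scope_py_alt
  rw [pv_split_head]
  simp only [List.contains_eq_mem, List.mem_cons, List.not_mem_nil, or_false,
    List.any_cons, List.any_nil, Bool.if_true_left, Bool.or_eq_true, Bool.false_eq_true,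
    decide_eq_true_eq, PySem.Chars.startswith_iff, ← String.toList_inj,
    String.toList_ofList]
  rw [iff_iff_implies_and_implies]
  constructor
  · rintro ((h | h | h) | h | h | h)
    · exact Or.inl (hw.mp (Or.inl h))
    · exact Or.inr (Or.inl (hwi.mp (Or.inl h)))
    · exact Or.inr (Or.inr (ha.mp (Or.inl h)))
    · exact Or.inl (hw.mp (Or.inr h))
    · exact Or.inr (Or.inl (hwi.mp (Or.inr h)))
    · exact Or.inr (Or.inr (ha.mp (Or.inr h)))
  · rintro (h | h | h)
    · rcases hw.mpr h with h' | h'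
      · exact Or.inl (Or.inl h')
      · exact Or.inr (Or.inl h')
    · rcases hwi.mpr h with h' | h'
      · exact Or.inl (Or.inr (Or.inl h'))
      · exact Or.inr (Or.inr (Or.inl h'))
    · rcases ha.mpr h with h' | h'
      · exact Or.inl (Or.inr (Or.inr h'))
      · exact Or.inr (Or.inr (Or.inr h'))
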